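-- pv_equiv track=rewrite | github.com/Khoiisme1905/CS114_Test1 | The_largest_number_less_than_n_that_has_no_even_digits.py | sln
-- ===== SOURCE A (Python) =====
-- def sln(n):
--
--     if n <= 1:
--         return -1
--
--     def only_odd_digits(num):
--         return all(int(digit) % 2 == 1 for digit in str(num))
--
--     start = n - 1
--     if start % 2 == 0:
--         start -= 1
--
--
--     for num in range(start, 0, -2):
--         if only_odd_digits(num):
--             return num
--
--     return -1
-- ===== SOURCE B (Python) =====
-- def sln(n):
--     # Greedy digit recursion: O(d^2) in the number of digits d, instead of scanning numbers downward.
--     def all_odd(q):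
--         while q > 0:
--             if q % 2 == 0:
--                 return False
--             q //= 10
--         return True
--
--     def g(m):
--         # largest number <= m whose decimal digits are all odd, or 0 if none (m <= 0)
--         if m <= 0:
--             return 0
--         if m < 10:
--             return m if m % 2 == 1 else m - 1
--         q, r = divmod(m, 10)
--         if all_odd(q) and r >= 1:
--             return 10 * q + (r if r % 2 == 1 else r - 1)
--         return 10 * g(q - 1) + 9
--
--     if n <= 1:
--         return -1
--     return g(n - 1)
-- ===== Notes on version B (the rewrite author's own statement) =====
-- stated objective: faster
-- what changed: B replaces A's downward scan over all odd numbers below n (testing every candidate's digits) with a greedy digit recursion that builds the largest all-odd number <= n-1 directly from the decimal digits of n-1.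
import Mathlib
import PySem

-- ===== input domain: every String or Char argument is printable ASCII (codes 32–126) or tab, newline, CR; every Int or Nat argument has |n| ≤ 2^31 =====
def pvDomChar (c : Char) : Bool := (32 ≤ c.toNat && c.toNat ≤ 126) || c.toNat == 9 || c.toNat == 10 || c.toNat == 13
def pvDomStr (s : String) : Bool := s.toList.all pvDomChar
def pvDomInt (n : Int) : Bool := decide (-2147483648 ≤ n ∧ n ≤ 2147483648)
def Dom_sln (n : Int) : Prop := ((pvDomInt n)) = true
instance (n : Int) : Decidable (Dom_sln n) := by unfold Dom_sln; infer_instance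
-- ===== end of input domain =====

-- B replaces A's downward numeric scan with a greedy digit recursion on n-1 (asymptotically faster: O(d^2) digit work instead of O(n*d) scanning).

-- ===== PORT A =====
-- A helper: only_odd_digits(num) = all(int(digit) % 2 == 1 for digit in str(num))
-- int(digit) ported as (ofChars? [c]).getD 0: exact here, the loop below only passes positive num
def onlyOddA (num : Int) : Bool :=
  (PySem.Int.toChars num).all (fun c =>
    PySem.Int.mod ((PySem.Int.ofChars? [c]).getD 0) 2 == 1)

def sln (n : Int) : Int :=
  if n ≤ 1 then -1
  else
    let start := n - 1
    let start := if PySem.Int.mod start 2 == 0 then start - 1 else start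
    match (PySem.List.pyRange start 0 (-2)).find? onlyOddA with
    | some v => v
    | none => -1

-- ===== PORT B =====
def allOddB (q : Int) : Bool :=
  if h : q ≤ 0 then true
  else if PySem.Int.mod q 2 == 0 then false
  else allOddB (PySem.Int.floordiv q 10)
termination_by q.toNat
decreasing_by
  rw [PySem.Int.floordiv_eq_ediv_of_pos (by norm_num)]
  omega

def gB (m : Int) : Int :=
  if h : m ≤ 0 then 0
  else if m < 10 then (if PySem.Int.mod m 2 == 1 then m else m - 1)
  else
    let q := PySem.Int.floordiv m 10
    let r := PySem.Int.mod m 10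
    if allOddB q && decide (1 ≤ r) then 10 * q + (if PySem.Int.mod r 2 == 1 then r else r - 1)
    else 10 * gB (q - 1) + 9
termination_by m.toNat
decreasing_by
  simp only [PySem.Int.floordiv_eq_ediv_of_pos (by norm_num : (0:Int) < 10)]
  omega

def sln_alt (n : Int) : Int :=
  if n ≤ 1 then -1 else gB (n - 1)

-- ===== PRECONDITION & SPEC =====
def Spec_sln (n : Int) (out : Int) : Prop := out = sln_alt n
instance (n : Int) (out : Int) : Decidable (Spec_sln n out) := by unfold Spec_sln; infer_instance

-- ===== CLAIM (what is proved, stated in full; the proofs are below) =====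
def Claim_equal_sln : Prop := ∀ (n : Int), Dom_sln n → Spec_sln n (sln n)

-- ===== LEMMAS AND PROOFS =====

-- Proof-side Nat twins of B's helpers
def allOddN (u : Nat) : Bool :=
  if u = 0 then true else (u % 2 == 1) && allOddN (u / 10)
termination_by u
decreasing_by omega

def gN (m : Nat) : Nat :=
  if m = 0 then 0
  else if m < 10 then (if m % 2 == 1 then m else m - 1)
  else if allOddN (m / 10) && 1 ≤ m % 10 then
    10 * (m / 10) + (if (m % 10) % 2 == 1 then m % 10 else m % 10 - 1)
  else 10 * gN (m / 10 - 1) + 9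
termination_by m
decreasing_by omega

lemma allOddB_eq (u : Nat) : allOddB (u : Int) = allOddN u := by
  induction u using Nat.strong_induction_on with
  | _ u ih =>
    rw [allOddB, allOddN,
      PySem.Int.mod_eq_emod_of_pos (by norm_num : (0:Int) < 2),
      PySem.Int.floordiv_eq_ediv_of_pos (by norm_num : (0:Int) < 10)]
    by_cases h0 : u = 0
    · simp [h0]
    · have hpos : ¬ ((u : Int) ≤ 0) := by omega
      have hdiv : (u : Int) / 10 = ((u / 10 : Nat) : Int) := by omega
      simp only [dif_neg hpos, if_neg h0, hdiv, ih (u / 10) (by omega)]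
      by_cases he : u % 2 = 0
      · have : (u : Int) % 2 = 0 := by omega
        simp [he, this]
      · have h1 : u % 2 = 1 := by omega
        have h1' : (u : Int) % 2 = 1 := by omega
        simp [h1, h1']

lemma gB_eq (m : Nat) : gB (m : Int) = (gN m : Int) := by
  induction m using Nat.strong_induction_on with
  | _ m ih =>
    rw [gB, gN]
    simp only [PySem.Int.mod_eq_emod_of_pos (by norm_num : (0:Int) < 2),
      PySem.Int.mod_eq_emod_of_pos (by norm_num : (0:Int) < 10),
      PySem.Int.floordiv_eq_ediv_of_pos (by norm_num : (0:Int) < 10)]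
    by_cases h0 : m = 0
    · simp [h0]
    · have hpos : ¬ ((m : Int) ≤ 0) := by omega
      have hdiv : (m : Int) / 10 = ((m / 10 : Nat) : Int) := by omega
      have hmod : (m : Int) % 10 = ((m % 10 : Nat) : Int) := by omega
      simp only [dif_neg hpos, if_neg h0, hdiv, hmod]
      by_cases hlt : m < 10
      · have hlt' : (m : Int) < 10 := by omega
        simp only [if_pos hlt', if_pos hlt]
        by_cases ho : m % 2 = 1
        · have ho' : (m:Int) % 2 = 1 := by omega
          simp [ho, ho']
        · have ho' : ¬ ((m:Int) % 2 = 1) := by omega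
          simp only [beq_iff_eq, if_neg ho, if_neg ho']
          omega
      · have hge : ¬ ((m : Int) < 10) := by omega
        simp only [if_neg hge, if_neg hlt, allOddB_eq]
        have hr : (1 ≤ ((m % 10 : Nat) : Int)) ↔ 1 ≤ m % 10 := by omega
        by_cases hb : allOddN (m / 10) = true
        · by_cases h1 : 1 ≤ m % 10
          · have h1' : (1:Int) ≤ ((m % 10 : Nat) : Int) := by omega
            simp only [hb, h1, h1', decide_true, Bool.true_and, if_pos]
            by_cases ho : (m % 10) % 2 = 1
            · have ho' : ((m % 10 : Nat) : Int) % 2 = 1 := by omega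
              simp [ho]; omega
            · have ho' : ¬ (((m % 10 : Nat) : Int) % 2 = 1) := by omega
              simp only [beq_iff_eq, if_neg ho, if_neg ho']
              push_cast
              omega
          · have h1' : ¬ ((1:Int) ≤ ((m % 10 : Nat) : Int)) := by omega
            have hq1 : ((m / 10 : Nat) : Int) - 1 = ((m / 10 - 1 : Nat) : Int) := by omega
            simp only [hb, h1, h1', decide_false, Bool.and_false, if_neg,
              Bool.false_eq_true, not_false_eq_true, hq1,
              ih (m / 10 - 1) (by omega)]
            push_cast
            omega
        · simp only [Bool.not_eq_true] at hb
          have hq1 : ((m / 10 : Nat) : Int) - 1 = ((m / 10 - 1 : Nat) : Int) := by omega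
          simp only [hb, Bool.false_and, if_neg, Bool.false_eq_true, not_false_eq_true, hq1,
            ih (m / 10 - 1) (by omega)]
          push_cast
          omega

lemma tdc_append (f : Nat) : ∀ (n : Nat) (ds : List Char),
    Nat.toDigitsCore 10 f n ds = Nat.toDigitsCore 10 f n [] ++ ds := by
  induction f with
  | zero => intro n ds; simp [Nat.toDigitsCore]
  | succ f ih =>
    intro n ds
    simp only [Nat.toDigitsCore]
    by_cases h : n / 10 = 0
    · simp [h]
    · simp only [if_neg h]
      rw [ih (n / 10) [(n % 10).digitChar], ih (n / 10) ((n % 10).digitChar :: ds)]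
      simp

lemma tdc_fuel (n : Nat) : ∀ (f f' : Nat) (ds : List Char), n < f → n < f' →
    Nat.toDigitsCore 10 f n ds = Nat.toDigitsCore 10 f' n ds := by
  induction n using Nat.strong_induction_on with
  | _ n ih =>
    intro f f' ds hf hf'
    obtain ⟨g, rfl⟩ : ∃ g, f = g + 1 := ⟨f - 1, by omega⟩
    obtain ⟨g', rfl⟩ : ∃ g', f' = g' + 1 := ⟨f' - 1, by omega⟩
    simp only [Nat.toDigitsCore]
    by_cases h : n / 10 = 0
    · simp [h]
    · simp only [if_neg h]
      exact ih (n / 10) (by omega) g g' _ (by omega) (by omega)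

lemma toDigits_small (n : Nat) (h : n < 10) : Nat.toDigits 10 n = [Nat.digitChar n] := by
  simp [Nat.toDigits, Nat.toDigitsCore, Nat.div_eq_of_lt h, Nat.mod_eq_of_lt h]

lemma toDigits_peel (n : Nat) (h : 10 ≤ n) :
    Nat.toDigits 10 n = Nat.toDigits 10 (n / 10) ++ [Nat.digitChar (n % 10)] := by
  have hne : n / 10 ≠ 0 := by omega
  rw [Nat.toDigits, Nat.toDigits]
  conv_lhs => rw [Nat.toDigitsCore]
  rw [if_neg hne, tdc_fuel (n / 10) n (n / 10 + 1) _ (by omega) (by omega),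
    tdc_append]

lemma digitChar_odd (d : Nat) (h : d < 10) :
    (PySem.Int.mod ((PySem.Int.ofChars? [Nat.digitChar d]).getD 0) 2 == 1) = (d % 2 == 1) := by
  interval_cases d <;> decide

lemma onlyOddA_eq (u : Nat) (hu : 1 ≤ u) : onlyOddA (u : Int) = allOddN u := by
  induction u using Nat.strong_induction_on with
  | _ u ih =>
    have htc : PySem.Int.toChars (u : Int) = Nat.toDigits 10 u := by
      simp [PySem.Int.toChars]
    rw [onlyOddA, htc, allOddN, if_neg (by omega : ¬ u = 0)]
    by_cases h : u < 10
    · rw [toDigits_small u h]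
      have h10 : u / 10 = 0 := by omega
      simp only [List.all_cons, List.all_nil, Bool.and_true]
      rw [digitChar_odd u h]
      simp [h10, allOddN]
    · rw [toDigits_peel u (by omega), List.all_append]
      have : (Nat.toDigits 10 (u / 10)).all
          (fun c => PySem.Int.mod ((PySem.Int.ofChars? [c]).getD 0) 2 == 1)
          = onlyOddA ((u / 10 : Nat) : Int) := by
        rw [onlyOddA]
        have h1 : ¬ ((u : Int) / 10 < 0) := by omega
        have h2 : ((u : Int) / 10).toNat = u / 10 := by omega
        simp [PySem.Int.toChars, h1, h2]
      rw [this, ih (u / 10) (by omega) (by omega)]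
      simp only [List.all_cons, List.all_nil, Bool.and_true,
        digitChar_odd (u % 10) (by omega)]
      have : u % 10 % 2 = u % 2 := by omega
      rw [this, Bool.and_comm]

lemma allOddN_zero : allOddN 0 = true := by rw [allOddN]; simp

lemma allOddN_pos (k : Nat) (h : k ≠ 0) :
    allOddN k = ((k % 2 == 1) && allOddN (k / 10)) := by
  rw [allOddN, if_neg h]

lemma gN_spec (m : Nat) (hm : 1 ≤ m) :
    1 ≤ gN m ∧ gN m ≤ m ∧ allOddN (gN m) = true ∧
      ∀ k, gN m < k → k ≤ m → allOddN k = false := by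
  induction m using Nat.strong_induction_on with
  | _ m ih =>
    rw [gN, if_neg (by omega : ¬ m = 0)]
    by_cases hlt : m < 10
    · rw [if_pos hlt]
      by_cases ho : m % 2 = 1
      · simp only [ho, beq_self_eq_true, if_pos]
        refine ⟨hm, le_refl m, ?_, by omega⟩
        rw [allOddN_pos m (by omega), Nat.div_eq_of_lt hlt]
        simp [ho, allOddN_zero]
      · have hbe : (m % 2 == 1) = false := by simpa using ho
        simp only [hbe, Bool.false_eq_true, if_false]
        have hm2 : 2 ≤ m := by omega
        refine ⟨by omega, by omega, ?_, ?_⟩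
        · rw [allOddN_pos (m - 1) (by omega), Nat.div_eq_of_lt (by omega)]
          have : (m - 1) % 2 = 1 := by omega
          simp [this, allOddN_zero]
        · intro k hk1 hk2
          have : k = m := by omega
          subst this
          rw [allOddN_pos k (by omega)]
          have : k % 2 = 0 := by omega
          simp [this]
    · rw [if_neg hlt]
      have hq1 : 1 ≤ m / 10 := by omega
      by_cases hb : (allOddN (m / 10) && 1 ≤ m % 10) = true
      · rw [if_pos hb]
        obtain ⟨ha, hr⟩ := Bool.and_eq_true_iff.mp hb
        have hr1 : 1 ≤ m % 10 := by simpa using hr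
        set r := m % 10 with hrdef
        by_cases ho : r % 2 = 1
        · simp only [ho, beq_self_eq_true, if_pos]
          refine ⟨by omega, by omega, ?_, ?_⟩
          · rw [allOddN_pos _ (by omega)]
            have h1 : (10 * (m / 10) + r) % 2 = 1 := by omega
            have h2 : (10 * (m / 10) + r) / 10 = m / 10 := by omega
            simp [h1, h2, ha]
          · intro k hk1 hk2
            exfalso; omega
        · have hr2 : 2 ≤ r := by omega
          have hbe : (r % 2 == 1) = false := by simpa using ho
          simp only [hbe, Bool.false_eq_true, if_false]
          refine ⟨by omega, by omega, ?_, ?_⟩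
          · rw [allOddN_pos _ (by omega)]
            have h1 : (10 * (m / 10) + (r - 1)) % 2 = 1 := by omega
            have h2 : (10 * (m / 10) + (r - 1)) / 10 = m / 10 := by omega
            simp [h1, h2, ha]
          · intro k hk1 hk2
            have hkm : k = m := by omega
            subst hkm
            rw [allOddN_pos k (by omega)]
            have : k % 2 = 0 := by omega
            simp [this]
      · rw [if_neg hb]
        set q := m / 10 with hq
        have hg' : gN (q - 1) ≤ q - 1 ∧
            (gN (q - 1) = 0 ∨ (1 ≤ gN (q - 1) ∧ allOddN (gN (q - 1)) = true)) ∧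
            ∀ u, gN (q - 1) < u → u ≤ q - 1 → allOddN u = false := by
          by_cases hq1' : q = 1
          · have h0 : gN 0 = 0 := by rw [gN]; simp
            rw [hq1']
            refine ⟨by simp [h0], Or.inl h0, ?_⟩
            intro u hu1 hu2
            rw [h0] at hu1
            exfalso; omega
          · have := ih (q - 1) (by omega) (by omega)
            exact ⟨this.2.1, Or.inr ⟨this.1, this.2.2.1⟩, this.2.2.2⟩
        obtain ⟨hg1, hg2, hg3⟩ := hg'
        set g' := gN (q - 1) with hgdef
        refine ⟨by omega, by omega, ?_, ?_⟩
        · rw [allOddN_pos _ (by omega)]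
          have h1 : (10 * g' + 9) % 2 = 1 := by omega
          have h2 : (10 * g' + 9) / 10 = g' := by omega
          rcases hg2 with h0 | ⟨_, hao⟩
          · simp [h0, allOddN_zero]
          · simp [h1, h2, hao]
        · intro k hk1 hk2
          rw [allOddN_pos k (by omega)]
          by_cases hk2' : k % 2 = 1
          · have hu : g' < k / 10 := by omega
            have huq : k / 10 ≤ q := by omega
            by_cases hueq : k / 10 = q
            · have hcond : allOddN q = false ∨ m % 10 = 0 := by
                rcases Bool.and_eq_false_iff.mp (Bool.not_eq_true _ |>.mp hb) with h | h
                · exact Or.inl (by simpa using h)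
                · right
                  have := of_decide_eq_false h
                  omega
              rcases hcond with h | h
              · simp [hueq, h]
              · exfalso
                omega
            · have := hg3 (k / 10) hu (by omega)
              simp [this]
          · simp [hk2']

lemma find?_sorted {l : List Int} {p : Int → Bool} {v : Int}
    (hl : l.Pairwise (· > ·)) (hv : v ∈ l) (hpv : p v = true)
    (hmax : ∀ w ∈ l, v < w → p w = false) : l.find? p = some v := by
  induction l with
  | nil => cases hv
  | cons x t ih =>
    rcases List.mem_cons.mp hv with rfl | hvt
    · rw [List.find?_cons, hpv]
    · have hxv : x > v := (List.pairwise_cons.mp hl).1 v hvt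
      have hx : p x = false := hmax x List.mem_cons_self hxv
      rw [List.find?_cons, hx]
      exact ih (List.pairwise_cons.mp hl).2 hvt
        (fun w hw hvw => hmax w (List.mem_cons_of_mem x hw) hvw)

lemma pairwise_pyRange_neg2 (a : Int) :
    (PySem.List.pyRange a 0 (-2)).Pairwise (· > ·) := by
  rw [PySem.List.pyRange_of_neg a 0 (by norm_num)]
  refine List.Pairwise.map _ ?_ (List.pairwise_lt_range)
  intro k k' hkk'
  omega

theorem sln_eq_alt (n : Int) : sln n = sln_alt n := by
  rw [sln, sln_alt]
  by_cases h : n ≤ 1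
  · simp [h]
  · simp only [if_neg h]
    have hm1 : 1 ≤ (n - 1).toNat := by omega
    set m : Nat := (n - 1).toNat with hmdef
    have hn1 : n - 1 = (m : Int) := by omega
    have hB : gB (n - 1) = ((gN m : Nat) : Int) := by rw [hn1, gB_eq]
    obtain ⟨hg1, hg2, hg3, hg4⟩ := gN_spec m hm1
    have hgodd : gN m % 2 = 1 := by
      rw [allOddN_pos _ (by omega)] at hg3
      have := (Bool.and_eq_true_iff.mp hg3).1
      simpa using this
    rw [PySem.Int.mod_eq_emod_of_pos (by norm_num : (0:Int) < 2)]
    set s : Int := if ((n - 1) % 2 == 0) then n - 1 - 1 else n - 1 with hs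
    have hs1 : s % 2 = 1 ∧ 1 ≤ s ∧ s ≤ n - 1 ∧ ∀ k : Int, k % 2 = 1 → k ≤ n - 1 → k ≤ s := by
      by_cases hp : (n - 1) % 2 = 0
      · have : ((n - 1) % 2 == 0) = true := by simpa using hp
        rw [hs, if_pos this]
        refine ⟨by omega, by omega, by omega, by omega⟩
      · have : ((n - 1) % 2 == 0) = false := by simpa using hp
        rw [hs, if_neg (by simp [this])]
        refine ⟨by omega, by omega, by omega, by omega⟩
      
    obtain ⟨hsodd, hsge, hsle, hsmax⟩ := hs1
    have hfind : (PySem.List.pyRange s 0 (-2)).find? onlyOddA = some ((gN m : Nat) : Int) := by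
      apply find?_sorted (pairwise_pyRange_neg2 s)
      · rw [PySem.List.mem_pyRange_iff_of_neg (by norm_num : (-2:Int) < 0)]
        refine ⟨by omega, ?_, ?_⟩
        · exact hsmax _ (by omega) (by omega)
        · rw [Int.neg_dvd]
          omega
      · rw [onlyOddA_eq (gN m) hg1]
        exact hg3
      · intro w hw hvw
        rw [PySem.List.mem_pyRange_iff_of_neg (by norm_num : (-2:Int) < 0)] at hw
        obtain ⟨hw0, hws, _⟩ := hw
        have hwn : w = ((w.toNat : Nat) : Int) := by omega
        rw [hwn, onlyOddA_eq w.toNat (by omega)]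
        exact hg4 w.toNat (by omega) (by omega)
    rw [hfind, hB]

-- ===== VERDICT (by name: the statement is the Claim_ definition above) =====
theorem sln_spec : Claim_equal_sln := by
  intro n _
  unfold Spec_sln
  exact sln_eq_alt n
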